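-- pv_equiv track=rewrite | github.com/dwelfusius/eindwerk | convert_excel_nopandas.py | get_invitees
-- ===== SOURCE A (Python) =====
-- def get_invitees(uni_mt, mt_list):
--     """get_invitees Per meeting collect all attendees in one
--     list of dictionaries using the meeting name as key
--
--     :param uni_mt: collection of unique meetings
--     :type uni_mt: dict
--     :param mt_list: all excel row entries
--     :type mt_list: list
--     :return: all meetings with their full invite list
--     :rtype: dict
--     """
--     inv_dicts = {}
--     for mt in uni_mt.items():
--         inv_list = []
--         inv_dict = {}
--         for i in mt_list:
--             if mt[0] in i:
--                 inv_dict = {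
--                     'displayname': i[4]+' '+i[5],
--                     'email': i[6],
--                     'coHost': i[7]}
--                 inv_list.append(inv_dict.copy())
--         inv_dicts[mt[0]] = inv_list
--     return inv_dicts
-- ===== SOURCE B (Python) =====
-- def get_invitees(uni_mt, mt_list):
--     rows_by_cell = {}
--     for i in mt_list:
--         for cell in dict.fromkeys(i):
--             rows_by_cell.setdefault(cell, []).append(i)
--     return {mt: [{'displayname': i[4] + ' ' + i[5],
--                   'email': i[6],
--                   'coHost': i[7]}
--                  for i in rows_by_cell.get(mt, [])]
--             for mt in uni_mt}
-- ===== Notes on version B (the rewrite author's own statement) =====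
-- stated objective: faster
-- what changed: A rescans every excel row for each unique meeting; B makes one grouping pass building a dict from cell value to the rows containing it (deduping cells per row), then answers each meeting by a single dict lookup.
import Mathlib
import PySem

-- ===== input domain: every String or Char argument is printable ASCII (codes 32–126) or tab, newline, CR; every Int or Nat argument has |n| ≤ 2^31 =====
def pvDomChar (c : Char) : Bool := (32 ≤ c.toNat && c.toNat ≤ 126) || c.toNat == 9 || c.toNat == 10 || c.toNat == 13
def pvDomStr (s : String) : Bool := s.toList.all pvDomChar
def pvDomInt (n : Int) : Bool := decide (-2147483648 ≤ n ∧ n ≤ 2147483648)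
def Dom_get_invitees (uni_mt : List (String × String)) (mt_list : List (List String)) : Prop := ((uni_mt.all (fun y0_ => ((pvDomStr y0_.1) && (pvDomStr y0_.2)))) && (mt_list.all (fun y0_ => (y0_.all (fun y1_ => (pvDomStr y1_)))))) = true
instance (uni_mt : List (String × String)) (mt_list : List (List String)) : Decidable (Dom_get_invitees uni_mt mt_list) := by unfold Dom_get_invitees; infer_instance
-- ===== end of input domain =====

-- B replaces A's scan of all rows per meeting by one grouping pass (cell value → rows),
-- then a lookup per meeting: same return value, asymptotically fewer row scans.

-- ===== PORT A =====
-- uni_mt models a Python dict: iterating its items visits each key once, in first-occurrence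
-- order (PySem.List.dedup of the keys); only mt[0] (the key) is used by A's body.
def get_invitees (uni_mt : List (String × String)) (mt_list : List (List String)) : List (String × List (List (String × String))) :=
  ((PySem.List.dedup (uni_mt.map Prod.fst)).foldl
    (fun (inv_dicts : PySem.Dict String (List (List (String × String)))) k =>
      inv_dicts.insert k
        (mt_list.foldl
          (fun inv_list i =>
            if i.contains k then
              inv_list ++ [[("displayname", PySem.List.pyGetD i 4 "" ++ " " ++ PySem.List.pyGetD i 5 ""),
                            ("email", PySem.List.pyGetD i 6 ""),
                            ("coHost", PySem.List.pyGetD i 7 "")]]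
            else inv_list)
          []))
    PySem.Dict.empty).items

-- ===== PORT B =====
-- the invitee record built from one row (B's dict literal in the comprehension)
def pvRecord (i : List String) : List (String × String) :=
  [("displayname", PySem.List.pyGetD i 4 "" ++ " " ++ PySem.List.pyGetD i 5 ""),
   ("email", PySem.List.pyGetD i 6 ""),
   ("coHost", PySem.List.pyGetD i 7 "")]

-- B's grouping pass: rows_by_cell maps each distinct cell value to the rows containing it
def pvRowsByCell (mt_list : List (List String)) : PySem.Dict String (List (List String)) :=
  mt_list.foldl
    (fun d i => (PySem.List.dedup i).foldl (fun d cell => d.modify cell [] (· ++ [i])) d)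
    PySem.Dict.empty

def get_invitees_alt (uni_mt : List (String × String)) (mt_list : List (List String)) : List (String × List (List (String × String))) :=
  (PySem.List.dedup (uni_mt.map Prod.fst)).map
    (fun mt => (mt, ((pvRowsByCell mt_list).getD mt []).map pvRecord))

-- ===== PRECONDITION & SPEC =====
-- Pre_ excludes exactly the inputs where Python A raises IndexError: a meeting key occurring
-- in a row with fewer than 8 columns (A reads i[4]..i[7] of every matching row).
def Pre_get_invitees (uni_mt : List (String × String)) (mt_list : List (List String)) : Prop :=
  ∀ p ∈ uni_mt, ∀ i ∈ mt_list, p.1 ∈ i → 8 ≤ i.length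
instance (uni_mt : List (String × String)) (mt_list : List (List String)) : Decidable (Pre_get_invitees uni_mt mt_list) := by unfold Pre_get_invitees; infer_instance
def pvWitness_get_invitees : (List (String × String)) × List (List String) :=
  ([("m1", "v")], [["m1", "b", "c", "d", "Jo", "Do", "jo@x.org", "yes"], ["m2"]])

def Spec_get_invitees (uni_mt : List (String × String)) (mt_list : List (List String)) (out : List (String × List (List (String × String)))) : Prop := out = get_invitees_alt uni_mt mt_list
instance (uni_mt : List (String × String)) (mt_list : List (List String)) (out : List (String × List (List (String × String)))) : Decidable (Spec_get_invitees uni_mt mt_list out) := by unfold Spec_get_invitees; infer_instance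

-- ===== CLAIM (what is proved, stated in full; the proofs are below) =====
def Claim_equal_get_invitees : Prop := ∀ (uni_mt : List (String × String)) (mt_list : List (List String)), Dom_get_invitees uni_mt mt_list → Pre_get_invitees uni_mt mt_list → Spec_get_invitees uni_mt mt_list (get_invitees uni_mt mt_list)

-- ===== LEMMAS AND PROOFS =====

-- effect of B's inner grouping loop (over the distinct cells of one row) on one key
lemma pv_inner_getD (i : List String) (cells : List String) (h : cells.Nodup)
    (d : PySem.Dict String (List (List String))) (k : String) :
    (cells.foldl (fun d c => d.modify c [] (· ++ [i])) d).getD k []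
      = d.getD k [] ++ (if k ∈ cells then [i] else []) := by
  induction cells generalizing d with
  | nil => simp
  | cons c cs ih =>
    rcases List.nodup_cons.mp h with ⟨hc, hcs⟩
    rw [List.foldl_cons, ih hcs, PySem.Dict.getD_modify]
    by_cases hk : k = c
    · subst hk
      simp [hc]
    · simp [hk]

-- B's rows_by_cell dict groups, per key k, exactly the rows containing k, in row order
lemma pv_rows_getD (m : List (List String)) (d : PySem.Dict String (List (List String))) (k : String) :
    (m.foldl (fun d i => (PySem.List.dedup i).foldl (fun d cell => d.modify cell [] (· ++ [i])) d) d).getD k []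
      = d.getD k [] ++ m.filter (fun i => i.contains k) := by
  induction m generalizing d with
  | nil => simp
  | cons i is ih =>
    rw [List.foldl_cons, ih, pv_inner_getD i _ (PySem.List.nodup_dedup i) d k]
    simp only [PySem.List.mem_dedup, List.filter_cons]
    by_cases hk : k ∈ i
    · simp [hk, List.append_assoc]
    · simp [hk]

-- ===== VERDICT (by name: the statement is the Claim_ definition above) =====
theorem get_invitees_spec : Claim_equal_get_invitees := by
  intro uni_mt mt_list _ _
  unfold Spec_get_invitees get_invitees get_invitees_alt
  rw [PySem.Dict.items_foldl_insert_fresh _ (fun a => a) _ _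
        (by intro a _; simp) (by simp)]
  simp only [PySem.Dict.empty, List.nil_append]
  refine List.map_congr_left (fun k _ => ?_)
  have h := PySem.List.foldl_append_if (fun i : List String => i.contains k) pvRecord mt_list []
  simp only [pvRecord] at h
  rw [h]
  unfold pvRowsByCell
  rw [pv_rows_getD]
  simp
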